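-- pv_equiv track=rewrite | github.com/christofmuc/KnobKraft-orm | adaptations/Behringer_Pro_800.py | _escape_sysex
-- ===== SOURCE A (Python) =====
-- from typing import List
--
-- def _escape_sysex(decoded: List[int]) -> List[int]:
--     encoded: List[int] = []
--     for index in range(0, len(decoded), 7):
--         chunk = decoded[index:index + 7]
--         msbits = 0
--         data_bytes = []
--         for bit_index, value in enumerate(chunk):
--             if value & 0x80:
--                 msbits |= 1 << bit_index
--             data_bytes.append(value & 0x7f)
--         encoded.append(msbits)
--         encoded.extend(data_bytes)
--     return encoded
-- ===== SOURCE B (Python) =====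
-- from typing import List
--
-- def _escape_sysex(decoded: List[int]) -> List[int]:
--     encoded: List[int] = []
--     msb_pos = 0
--     for index, value in enumerate(decoded):
--         if index % 7 == 0:
--             encoded.append(0)
--             msb_pos = len(encoded) - 1
--         if value & 0x80:
--             encoded[msb_pos] |= 1 << (index % 7)
--         encoded.append(value & 0x7f)
--     return encoded
-- ===== Notes on version B (the rewrite author's own statement) =====
-- stated objective: alternative
-- what changed: Replaces A's nested per-chunk loops (range(0,n,7) with slicing, separate msbits/data_bytes accumulators per chunk) by a single flat loop over enumerate(decoded) that appends a placeholder MSB byte at each chunk start and back-patches it in place via a remembered position.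
import Mathlib
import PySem

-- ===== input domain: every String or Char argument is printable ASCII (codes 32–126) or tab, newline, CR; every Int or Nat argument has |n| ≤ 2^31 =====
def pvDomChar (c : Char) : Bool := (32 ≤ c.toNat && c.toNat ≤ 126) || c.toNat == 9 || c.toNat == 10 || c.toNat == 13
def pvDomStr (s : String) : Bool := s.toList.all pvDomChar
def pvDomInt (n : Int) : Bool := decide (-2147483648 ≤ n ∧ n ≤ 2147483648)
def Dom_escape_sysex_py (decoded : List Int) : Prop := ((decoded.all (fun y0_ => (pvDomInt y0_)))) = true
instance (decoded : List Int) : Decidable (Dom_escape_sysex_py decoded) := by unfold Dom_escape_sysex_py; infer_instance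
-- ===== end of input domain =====

-- B replaces A's chunked nested loops (slice + per-chunk msbits/data accumulators) by one flat
-- pass that appends a placeholder MSB byte at each chunk start and back-patches it in place;
-- objective: alternative decomposition, same O(n) cost.

-- ===== PORT A =====
-- literal port of A: outer loop over range(0, len, 7), slice chunk, inner loop over
-- enumerate(chunk) accumulating (msbits, data_bytes), then append+extend
def escape_sysex_py (decoded : List Int) : List Int :=
  (PySem.List.pyRange 0 (decoded.length : Int) 7).foldl
    (fun encoded index =>
      let chunk := PySem.List.slice decoded (some index) (some (index + 7))
      let st := (PySem.List.enumerate chunk).foldl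
        (fun (st : Int × List Int) (p : Int × Int) =>
          (if PySem.Int.band p.2 0x80 ≠ 0 then PySem.Int.bor st.1 (1 <<< p.1) else st.1,
           st.2 ++ [PySem.Int.band p.2 0x7f]))
        (0, [])
      encoded ++ [st.1] ++ st.2)
    []

-- ===== PORT B =====
-- literal port of Source B's single flat loop; `msb_pos = len(encoded) - 1` right after the append
-- is `encoded.length` before it; `encoded[msb_pos] |= …` (msb_pos always in range) is set/getD
def escBLoop : List Int → Int → List Int → Nat → List Int
  | [], _, encoded, _ => encoded
  | value :: rest, index, encoded, msb_pos =>
    let st : List Int × Nat :=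
      if PySem.Int.mod index 7 = 0 then (encoded ++ [(0 : Int)], encoded.length)
      else (encoded, msb_pos)
    let encoded' :=
      if PySem.Int.band value 0x80 ≠ 0 then
        st.1.set st.2 (PySem.Int.bor (st.1.getD st.2 0) (1 <<< PySem.Int.mod index 7))
      else st.1
    escBLoop rest (index + 1) (encoded' ++ [PySem.Int.band value 0x7f]) st.2

def escape_sysex_py_alt (decoded : List Int) : List Int := escBLoop decoded 0 [] 0

-- ===== PRECONDITION & SPEC =====
def Spec_escape_sysex_py (decoded : List Int) (out : List Int) : Prop := out = escape_sysex_py_alt decoded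
instance (decoded : List Int) (out : List Int) : Decidable (Spec_escape_sysex_py decoded out) := by unfold Spec_escape_sysex_py; infer_instance

-- ===== CLAIM (what is proved, stated in full; the proofs are below) =====
def Claim_equal_escape_sysex_py : Prop := ∀ (decoded : List Int), Dom_escape_sysex_py decoded → Spec_escape_sysex_py decoded (escape_sysex_py decoded)

-- ===== LEMMAS AND PROOFS =====

-- common specification: per 7-chunk, the msbits fold and the escaped data bytes
def msFold : Int → Int → List Int → Int
  | m, _, [] => m
  | m, r, v :: ys =>
      msFold (if PySem.Int.band v 0x80 ≠ 0 then PySem.Int.bor m (1 <<< r) else m) (r + 1) ys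

def gSpec : List Int → List Int
  | [] => []
  | x :: xs =>
      msFold 0 0 ((x :: xs).take 7) ::
        ((x :: xs).take 7).map (fun v => PySem.Int.band v 0x7f) ++ gSpec ((x :: xs).drop 7)
  termination_by l => l.length
  decreasing_by simp

theorem mod7_emod (a : Int) : PySem.Int.mod a 7 = a % 7 := by
  simp [PySem.Int.mod, Int.fmod_eq_emod_of_nonneg]

def hA (xs : List Int) (i : Int) : List Int :=
  msFold 0 0 (PySem.List.slice xs (some i) (some (i + 7))) ::
    (PySem.List.slice xs (some i) (some (i + 7))).map (fun v => PySem.Int.band v 0x7f)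

theorem innerA (chunk : List Int) : ∀ (s m : Int) (acc : List Int),
    (PySem.List.enumerate chunk s).foldl
      (fun (st : Int × List Int) (p : Int × Int) =>
        (if PySem.Int.band p.2 0x80 ≠ 0 then PySem.Int.bor st.1 (1 <<< p.1) else st.1,
         st.2 ++ [PySem.Int.band p.2 0x7f])) (m, acc)
    = (msFold m s chunk, acc ++ chunk.map (fun v => PySem.Int.band v 0x7f)) := by
  induction chunk with
  | nil => intro s m acc; simp [PySem.List.enumerate_nil, msFold]
  | cons v rest ih =>
      intro s m acc
      simp only [PySem.List.enumerate_cons, List.foldl_cons]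
      rw [ih]
      simp [msFold]

theorem A_eq_flat (xs : List Int) :
    escape_sysex_py xs = (PySem.List.pyRange 0 (xs.length : Int) 7).flatMap (hA xs) := by
  unfold escape_sysex_py
  have hf : (fun (encoded : List Int) (index : Int) =>
      let chunk := PySem.List.slice xs (some index) (some (index + 7))
      let st := (PySem.List.enumerate chunk).foldl
        (fun (st : Int × List Int) (p : Int × Int) =>
          (if PySem.Int.band p.2 0x80 ≠ 0 then PySem.Int.bor st.1 (1 <<< p.1) else st.1,
           st.2 ++ [PySem.Int.band p.2 0x7f]))
        (0, [])
      encoded ++ [st.1] ++ st.2)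
      = fun encoded index => encoded ++ hA xs index := by
    funext enc i
    simp only [innerA]
    simp [hA]
  rw [hf, PySem.List.foldl_append_eq_flatMap]
  simp

theorem hA_shift (xs : List Int) (k : Nat) :
    hA xs ((7 * (k + 1) : Nat) : Int) = hA (xs.drop 7) ((7 * k : Nat) : Int) := by
  have h1 : PySem.List.slice xs (some ((7 * (k + 1) : Nat) : Int))
      (some (((7 * (k + 1) : Nat) : Int) + 7)) = (xs.drop (7 * (k + 1))).take 7 := by
    simpa using PySem.List.slice_natCast_add xs (7 * (k + 1)) 7
  have h2 : PySem.List.slice (xs.drop 7) (some ((7 * k : Nat) : Int))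
      (some (((7 * k : Nat) : Int) + 7)) = ((xs.drop 7).drop (7 * k)).take 7 := by
    simpa using PySem.List.slice_natCast_add (xs.drop 7) (7 * k) 7
  unfold hA
  rw [h1, h2, List.drop_drop]
  rw [show 7 + 7 * k = 7 * (k + 1) from by omega]

theorem flat_chunks : ∀ (n : Nat) (xs : List Int), xs.length = n →
    (PySem.List.pyRange 0 (xs.length : Int) 7).flatMap (hA xs) = gSpec xs := by
  intro n
  induction n using Nat.strong_induction_on with
  | _ n ih =>
    intro xs hlen
    match xs with
    | [] =>
        simp only [List.length_nil, Nat.cast_zero]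
        rw [show PySem.List.pyRange 0 0 7 = [] from by decide, gSpec]
        simp
    | x :: tail =>
      have hn1 : 1 ≤ (x :: tail).length := by simp
      have hrange : PySem.List.pyRange 0 (((x :: tail).length : Nat) : Int) 7
          = List.map (fun k : Nat => ((7 * k : Nat) : Int))
              (List.range (((x :: tail).length - 1) / 7 + 1)) := by
        rw [PySem.List.pyRange_of_pos 0 _ (by norm_num)]
        rw [if_pos (by exact_mod_cast Nat.lt_of_lt_of_le Nat.zero_lt_one hn1)]
        have h2 : ((((x :: tail).length : Int) - 0 + 7 - 1) / 7).toNat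
            = ((x :: tail).length - 1) / 7 + 1 := by omega
        rw [h2]
        refine List.map_congr_left ?_
        intro k _
        push_cast
        ring
      rw [hrange, List.range_succ_eq_map, List.map_cons, List.map_map, List.flatMap_cons,
        List.flatMap_map]
      have hhead : hA (x :: tail) ((7 * 0 : Nat) : Int)
          = msFold 0 0 ((x :: tail).take 7) ::
              ((x :: tail).take 7).map (fun v => PySem.Int.band v 0x7f) := by
        have h1 : PySem.List.slice (x :: tail) (some ((7 * 0 : Nat) : Int))
            (some (((7 * 0 : Nat) : Int) + 7)) = (x :: tail).take 7 := by
          simpa using PySem.List.slice_natCast_add (x :: tail) 0 7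
        unfold hA
        rw [h1]
      have hrange2 : PySem.List.pyRange 0 ((((x :: tail).drop 7).length : Nat) : Int) 7
          = List.map (fun k : Nat => ((7 * k : Nat) : Int))
              (List.range (((x :: tail).length - 1) / 7)) := by
        rw [PySem.List.pyRange_of_pos 0 _ (by norm_num)]
        have hld : ((x :: tail).drop 7).length = (x :: tail).length - 7 := by
          simp
        rw [hld]
        by_cases hc : 7 < (x :: tail).length
        · rw [if_pos (by exact_mod_cast by omega)]
          have h2 : (((((x :: tail).length - 7 : Nat) : Int) - 0 + 7 - 1) / 7).toNat
              = ((x :: tail).length - 1) / 7 := by omega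
          rw [h2]
          refine List.map_congr_left ?_
          intro k _
          push_cast
          ring
        · rw [if_neg (by omega)]
          have h2 : ((x :: tail).length - 1) / 7 = 0 := by omega
          rw [h2]
          simp
      have hih := ih ((x :: tail).drop 7).length
        (by simp at hlen ⊢; omega) ((x :: tail).drop 7) rfl
      rw [hrange2, List.flatMap_map] at hih
      simp only [Function.comp_apply, Nat.succ_eq_add_one, hA_shift] at *
      rw [hhead, hih]
      conv_rhs => rw [gSpec]

theorem A_eq_gSpec (xs : List Int) : escape_sysex_py xs = gSpec xs := by
  rw [A_eq_flat, flat_chunks xs.length xs rfl]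

theorem Bmain : ∀ (n : Nat) (ys : List Int), ys.length ≤ n →
    ((∀ (index : Int) (enc : List Int) (mp : Nat), 0 ≤ index → PySem.Int.mod index 7 = 0 →
        escBLoop ys index enc mp = enc ++ gSpec ys) ∧
     (∀ (index : Int) (enc0 ds : List Int) (m : Int), 0 ≤ index →
        PySem.Int.mod index 7 = (ds.length : Int) → 1 ≤ ds.length → ds.length ≤ 6 →
        escBLoop ys index (enc0 ++ m :: ds) enc0.length =
          enc0 ++ msFold m (ds.length : Int) (ys.take (7 - ds.length)) ::
            (ds ++ (ys.take (7 - ds.length)).map (fun v => PySem.Int.band v 0x7f))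
            ++ gSpec (ys.drop (7 - ds.length)))) := by
  intro n
  induction n using Nat.strong_induction_on with
  | _ n ih =>
    intro ys hlen
    match ys with
    | [] =>
        refine ⟨?_, ?_⟩
        · intro index enc mp _ _
          rw [show gSpec [] = [] from by rw [gSpec]]
          simp [escBLoop]
        · intro index enc0 ds m _ _ _ _
          simp only [List.take_nil, List.drop_nil, List.map_nil, List.append_nil]
          rw [show gSpec [] = [] from by rw [gSpec]]
          simp [escBLoop, msFold]
    | v :: rest =>
        have hrest : rest.length < n := by simp at hlen; omega
        refine ⟨?_, ?_⟩
        · -- chunk boundary: place the placeholder, then go mid-chunk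
          intro index enc mp h0 hmod
          have hmodE : index % 7 = 0 := by rw [← mod7_emod]; exact hmod
          have hencoded : (if PySem.Int.band v 0x80 ≠ 0 then
                (enc ++ [(0 : Int)]).set enc.length
                  (PySem.Int.bor ((enc ++ [(0 : Int)]).getD enc.length 0)
                    (1 <<< PySem.Int.mod index 7))
              else enc ++ [(0 : Int)])
              = enc ++ [if PySem.Int.band v 0x80 ≠ 0 then
                  PySem.Int.bor 0 (1 <<< PySem.Int.mod index 7) else 0] := by
            split_ifs with h <;> simp
          simp only [escBLoop, if_pos hmod]
          rw [hencoded]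
          have hstep := (ih rest.length hrest rest le_rfl).2 (index + 1) enc
            [PySem.Int.band v 0x7f]
            (if PySem.Int.band v 0x80 ≠ 0 then
                PySem.Int.bor 0 (1 <<< PySem.Int.mod index 7) else 0)
            (by omega)
            (by rw [mod7_emod]; simp; omega)
            (by simp) (by simp)
          rw [List.append_assoc]
          simp only [List.cons_append, List.nil_append]
          rw [hstep]
          conv_rhs => rw [gSpec]
          simp [msFold, hmodE]
        · -- mid-chunk: back-patch the MSB byte at enc0.length
          intro index enc0 ds m h0 hmod h1 h6
          have hmodE : index % 7 = (ds.length : Int) := by rw [← mod7_emod]; exact hmod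
          have hne : ¬ (PySem.Int.mod index 7 = 0) := by
            rw [mod7_emod]; omega
          have hencoded : (if PySem.Int.band v 0x80 ≠ 0 then
                (enc0 ++ m :: ds).set enc0.length
                  (PySem.Int.bor ((enc0 ++ m :: ds).getD enc0.length 0)
                    (1 <<< PySem.Int.mod index 7))
              else enc0 ++ m :: ds)
              = enc0 ++ (if PySem.Int.band v 0x80 ≠ 0 then
                  PySem.Int.bor m (1 <<< PySem.Int.mod index 7) else m) :: ds := by
            split_ifs with h <;> simp
          simp only [escBLoop, if_neg hne]
          rw [hencoded]
          by_cases hlt : ds.length ≤ 5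
          · have hstep := (ih rest.length hrest rest le_rfl).2 (index + 1) enc0
              (ds ++ [PySem.Int.band v 0x7f])
              (if PySem.Int.band v 0x80 ≠ 0 then
                  PySem.Int.bor m (1 <<< PySem.Int.mod index 7) else m)
              (by omega)
              (by rw [mod7_emod]; simp; omega)
              (by simp) (by simp; omega)
            rw [List.append_assoc]
            simp only [List.cons_append]
            rw [hstep]
            have h7 : 7 - ds.length = (6 - ds.length) + 1 := by omega
            rw [h7, List.take_succ_cons, List.drop_succ_cons]
            simp only [List.length_append, List.length_cons, List.length_nil]
            have h8 : 7 - (ds.length + (0 + 1)) = 6 - ds.length := by omega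
            rw [h8]
            simp [msFold, hmodE]
          · have hd6 : ds.length = 6 := by omega
            have hstep := (ih rest.length hrest rest le_rfl).1 (index + 1)
              (enc0 ++ (if PySem.Int.band v 0x80 ≠ 0 then
                  PySem.Int.bor m (1 <<< PySem.Int.mod index 7) else m)
                :: (ds ++ [PySem.Int.band v 0x7f]))
              enc0.length (by omega)
              (by rw [mod7_emod]; omega)
            rw [List.append_assoc]
            simp only [List.cons_append]
            rw [hstep]
            rw [hd6]
            norm_num
            simp [msFold, hmodE, hd6]

theorem B_eq_gSpec (xs : List Int) : escape_sysex_py_alt xs = gSpec xs := by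
  have h := (Bmain xs.length xs le_rfl).1 0 [] 0 le_rfl (by decide)
  simpa [escape_sysex_py_alt] using h

-- ===== VERDICT (by name: the statement is the Claim_ definition above) =====
theorem escape_sysex_py_spec : Claim_equal_escape_sysex_py := by
  intro decoded _
  unfold Spec_escape_sysex_py
  rw [A_eq_gSpec, B_eq_gSpec]
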